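-- pv_equiv track=rewrite | github.com/ahmedha-data-analyst/ad_wwu_flow_pressure | app.py | get_flow_axis_label
-- ===== SOURCE A (Python) =====
-- def get_flow_axis_label(flow_cols, flow_unit, loc_flow_unit=None):
--     if not flow_cols:
--         return "Value"
--
--     col_lower = [c.lower() for c in flow_cols]
--     has_mcmd = any("mcm/d" in c for c in col_lower)
--     has_kscmh = any("kscmh" in c for c in col_lower)
--     # A column is Scmh if it says "scmh" OR if the location is a Scmh location
--     has_scmh = any(
--         ("scmh" in c and "kscmh" not in c)
--         or (loc_flow_unit == "Scmh" and "flow" in c and "kscmh" not in c)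
--         for c in col_lower
--     )
--
--     if has_mcmd and (has_kscmh or has_scmh):
--         return "Flow (mixed units)"
--     if has_mcmd:
--         return "Flow (mcm/d)"
--     if flow_unit == "kScmh" and (has_scmh or loc_flow_unit == "Scmh"):
--         return "Flow (kScmh)"
--     if has_kscmh:
--         return "Flow (Kscmh)"
--     return f"Flow ({flow_unit})"
-- ===== SOURCE B (Python) =====
-- def _column_tags(col, loc_is_scmh):
--     """Classify one column into the set of unit tags it contributes."""
--     lc = col.lower()
--     if "kscmh" in lc:
--         tags = {"kscmh"}
--     elif "scmh" in lc or (loc_is_scmh and "flow" in lc):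
--         tags = {"scmh"}
--     else:
--         tags = set()
--     if "mcm/d" in lc:
--         tags.add("mcmd")
--     return tags
--
--
-- def get_flow_axis_label(flow_cols, flow_unit, loc_flow_unit=None):
--     if not flow_cols:
--         return "Value"
--     loc_is_scmh = loc_flow_unit == "Scmh"
--     kinds = set()
--     for c in flow_cols:
--         kinds |= _column_tags(c, loc_is_scmh)
--     if "mcmd" in kinds:
--         return "Flow (mixed units)" if kinds & {"kscmh", "scmh"} else "Flow (mcm/d)"
--     if flow_unit == "kScmh" and ("scmh" in kinds or loc_is_scmh):
--         return "Flow (kScmh)"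
--     return "Flow (Kscmh)" if "kscmh" in kinds else f"Flow ({flow_unit})"
-- ===== Notes on version B (the rewrite author's own statement) =====
-- stated objective: alternative
-- what changed: Each column is classified once by a helper into a set of unit tags ('mcmd'/'kscmh'/'scmh', with the kscmh-exclusion encoded as an if/elif priority instead of negated conjuncts); the tag sets are unioned into one set, and the label is chosen by nested membership/intersection tests on that set instead of A's three any() scans and flat four-branch cascade.
import Mathlib
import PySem

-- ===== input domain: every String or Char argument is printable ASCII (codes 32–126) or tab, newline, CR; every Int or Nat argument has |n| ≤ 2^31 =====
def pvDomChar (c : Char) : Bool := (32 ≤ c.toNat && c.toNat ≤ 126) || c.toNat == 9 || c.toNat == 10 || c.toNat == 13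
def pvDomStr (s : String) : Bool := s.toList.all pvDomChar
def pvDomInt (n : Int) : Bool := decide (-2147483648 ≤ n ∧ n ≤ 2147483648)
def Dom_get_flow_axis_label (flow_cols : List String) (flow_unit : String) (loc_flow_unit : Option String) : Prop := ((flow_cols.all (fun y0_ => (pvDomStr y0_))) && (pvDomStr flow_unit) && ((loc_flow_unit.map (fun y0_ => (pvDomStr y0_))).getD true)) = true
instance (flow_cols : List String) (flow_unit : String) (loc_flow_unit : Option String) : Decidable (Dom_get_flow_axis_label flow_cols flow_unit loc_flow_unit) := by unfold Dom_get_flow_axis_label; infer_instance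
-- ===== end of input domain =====

-- B classifies each column once into a set of unit tags, unions the tag sets, and picks the
-- label by nested membership tests on that set, replacing A's three any() scans and flat cascade
-- (objective: alternative).


-- ===== PORT A =====
def get_flow_axis_label (flow_cols : List String) (flow_unit : String) (loc_flow_unit : Option String) : String :=
  if flow_cols = [] then "Value"
  else
    let col_lower := flow_cols.map PySem.Str.lower
    let has_mcmd := col_lower.any (fun c => PySem.Str.isIn "mcm/d" c)
    let has_kscmh := col_lower.any (fun c => PySem.Str.isIn "kscmh" c)
    let has_scmh := col_lower.any (fun c =>
      (PySem.Str.isIn "scmh" c && !PySem.Str.isIn "kscmh" c)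
      || ((loc_flow_unit == some "Scmh") && PySem.Str.isIn "flow" c && !PySem.Str.isIn "kscmh" c))
    if has_mcmd && (has_kscmh || has_scmh) then "Flow (mixed units)"
    else if has_mcmd then "Flow (mcm/d)"
    else if (flow_unit == "kScmh") && (has_scmh || (loc_flow_unit == some "Scmh")) then "Flow (kScmh)"
    else if has_kscmh then "Flow (Kscmh)"
    else "Flow (" ++ flow_unit ++ ")"

-- ===== PORT B =====
-- Source B's _column_tags: classify one column into the set of unit tags it contributes
-- the if/elif/else classifying one lowercased column into its base tag set
def gfal_base_tags (lc : String) (loc_is_scmh : Bool) : PySem.Set String :=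
  if PySem.Str.isIn "kscmh" lc then PySem.Set.ofList ["kscmh"]
  else if PySem.Str.isIn "scmh" lc || (loc_is_scmh && PySem.Str.isIn "flow" lc) then PySem.Set.ofList ["scmh"]
  else PySem.Set.empty

def gfal_column_tags (col : String) (loc_is_scmh : Bool) : PySem.Set String :=
  if PySem.Str.isIn "mcm/d" (PySem.Str.lower col) then
    PySem.Set.add (gfal_base_tags (PySem.Str.lower col) loc_is_scmh) "mcmd"
  else gfal_base_tags (PySem.Str.lower col) loc_is_scmh

def get_flow_axis_label_alt (flow_cols : List String) (flow_unit : String) (loc_flow_unit : Option String) : String :=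
  if flow_cols = [] then "Value"
  else
    let loc_is_scmh := loc_flow_unit == some "Scmh"
    let kinds := flow_cols.foldl (fun s c => PySem.Set.union s (gfal_column_tags c loc_is_scmh)) PySem.Set.empty
    if PySem.Set.contains kinds "mcmd" then
      if !(PySem.Set.inter kinds (PySem.Set.ofList ["kscmh", "scmh"])).isEmpty then "Flow (mixed units)"
      else "Flow (mcm/d)"
    else if (flow_unit == "kScmh") && (PySem.Set.contains kinds "scmh" || loc_is_scmh) then "Flow (kScmh)"
    else if PySem.Set.contains kinds "kscmh" then "Flow (Kscmh)"
    else "Flow (" ++ flow_unit ++ ")"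

-- ===== PRECONDITION & SPEC =====
def Spec_get_flow_axis_label (flow_cols : List String) (flow_unit : String) (loc_flow_unit : Option String) (out : String) : Prop := out = get_flow_axis_label_alt flow_cols flow_unit loc_flow_unit
instance (flow_cols : List String) (flow_unit : String) (loc_flow_unit : Option String) (out : String) : Decidable (Spec_get_flow_axis_label flow_cols flow_unit loc_flow_unit out) := by unfold Spec_get_flow_axis_label; infer_instance

-- ===== CLAIM =====
def Claim_equal_get_flow_axis_label : Prop := ∀ (flow_cols : List String) (flow_unit : String) (loc_flow_unit : Option String), Dom_get_flow_axis_label flow_cols flow_unit loc_flow_unit → Spec_get_flow_axis_label flow_cols flow_unit loc_flow_unit (get_flow_axis_label flow_cols flow_unit loc_flow_unit)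

-- ===== LEMMAS AND PROOFS =====

-- membership in the folded union of per-column tag sets
theorem mem_gfal_fold (loc : Bool) (cols : List String) (s0 : PySem.Set String) (x : String) :
    (x ∈ cols.foldl (fun s c => PySem.Set.union s (gfal_column_tags c loc)) s0) ↔
      x ∈ s0 ∨ ∃ c ∈ cols, x ∈ gfal_column_tags c loc := by
  induction cols generalizing s0 with
  | nil => simp
  | cons c cs ih =>
      simp [List.foldl_cons, ih, PySem.Set.mem_union, or_assoc]

-- the three tag memberships of one column, as A's per-column tests
theorem mem_tags_mcmd (c : String) (loc : Bool) :
    ("mcmd" ∈ gfal_column_tags c loc) ↔ PySem.Str.isIn "mcm/d" (PySem.Str.lower c) = true := by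
  unfold gfal_column_tags gfal_base_tags
  split_ifs <;> simp_all [PySem.Set.mem_ofList, PySem.Set.empty]

theorem mem_tags_kscmh (c : String) (loc : Bool) :
    ("kscmh" ∈ gfal_column_tags c loc) ↔ PySem.Str.isIn "kscmh" (PySem.Str.lower c) = true := by
  unfold gfal_column_tags gfal_base_tags
  split_ifs <;> simp_all [PySem.Set.mem_ofList, PySem.Set.empty]

theorem mem_tags_scmh (c : String) (loc : Bool) :
    ("scmh" ∈ gfal_column_tags c loc) ↔
      ((PySem.Str.isIn "scmh" (PySem.Str.lower c) && !PySem.Str.isIn "kscmh" (PySem.Str.lower c))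
        || (loc && PySem.Str.isIn "flow" (PySem.Str.lower c) && !PySem.Str.isIn "kscmh" (PySem.Str.lower c))) = true := by
  unfold gfal_column_tags gfal_base_tags
  split_ifs <;> simp_all [PySem.Set.mem_ofList, PySem.Set.empty]

-- ===== VERDICT =====
theorem get_flow_axis_label_spec : Claim_equal_get_flow_axis_label := by
  intro flow_cols flow_unit loc_flow_unit _
  unfold Spec_get_flow_axis_label get_flow_axis_label get_flow_axis_label_alt
  by_cases hnil : flow_cols = []
  · simp [hnil]
  · simp only [if_neg hnil]
    set loc := (loc_flow_unit == some "Scmh") with hloc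
    set kinds := flow_cols.foldl (fun s c => PySem.Set.union s (gfal_column_tags c loc)) PySem.Set.empty with hk
    have hmem : ∀ x, (x ∈ kinds) ↔ ∃ c ∈ flow_cols, x ∈ gfal_column_tags c loc := by
      intro x; rw [hk, mem_gfal_fold]; simp [PySem.Set.empty]
    have hm : PySem.Set.contains kinds "mcmd"
        = (flow_cols.map PySem.Str.lower).any (fun c => PySem.Str.isIn "mcm/d" c) := by
      simp only [PySem.Set.contains_eq_listContains, List.contains_eq_mem, List.any_map,
        decide_eq_decide.mpr (hmem "mcmd")]
      simp only [mem_tags_mcmd]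
      rw [Bool.eq_iff_iff]
      simp [List.any_eq_true, Function.comp]
    have hks : PySem.Set.contains kinds "kscmh"
        = (flow_cols.map PySem.Str.lower).any (fun c => PySem.Str.isIn "kscmh" c) := by
      simp only [PySem.Set.contains_eq_listContains, List.contains_eq_mem, List.any_map,
        decide_eq_decide.mpr (hmem "kscmh")]
      simp only [mem_tags_kscmh]
      rw [Bool.eq_iff_iff]
      simp [List.any_eq_true, Function.comp]
    have hs : PySem.Set.contains kinds "scmh"
        = (flow_cols.map PySem.Str.lower).any (fun c =>
            (PySem.Str.isIn "scmh" c && !PySem.Str.isIn "kscmh" c)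
            || (loc && PySem.Str.isIn "flow" c && !PySem.Str.isIn "kscmh" c)) := by
      simp only [PySem.Set.contains_eq_listContains, List.contains_eq_mem, List.any_map,
        decide_eq_decide.mpr (hmem "scmh")]
      simp only [mem_tags_scmh]
      rw [Bool.eq_iff_iff]
      simp [List.any_eq_true, Function.comp]
    have hinter : (!(PySem.Set.inter kinds (PySem.Set.ofList ["kscmh", "scmh"])).isEmpty)
        = (PySem.Set.contains kinds "kscmh" || PySem.Set.contains kinds "scmh") := by
      rcases hcase : (PySem.Set.contains kinds "kscmh" || PySem.Set.contains kinds "scmh") with _ | _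
      · simp only [Bool.or_eq_false_iff, PySem.Set.contains_eq_listContains,
          List.contains_eq_mem, decide_eq_false_iff_not] at hcase
        have : PySem.Set.inter kinds (PySem.Set.ofList ["kscmh", "scmh"]) = [] := by
          rw [List.eq_nil_iff_forall_not_mem]
          intro x hx
          rw [PySem.Set.mem_inter] at hx
          rcases hx with ⟨hx1, hx2⟩
          rw [PySem.Set.mem_ofList] at hx2
          simp only [List.mem_cons, List.not_mem_nil, or_false] at hx2
          rcases hx2 with rfl | rfl
          · exact hcase.1 hx1
          · exact hcase.2 hx1
        simp [this]
      · simp only [Bool.or_eq_true, PySem.Set.contains_eq_listContains,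
          List.contains_eq_mem, decide_eq_true_eq] at hcase
        have hne : PySem.Set.inter kinds (PySem.Set.ofList ["kscmh", "scmh"]) ≠ [] := by
          rw [Ne, List.eq_nil_iff_forall_not_mem]
          push Not
          rcases hcase with h | h
          · exact ⟨"kscmh", by rw [PySem.Set.mem_inter, PySem.Set.mem_ofList]; exact ⟨h, by simp⟩⟩
          · exact ⟨"scmh", by rw [PySem.Set.mem_inter, PySem.Set.mem_ofList]; exact ⟨h, by simp⟩⟩
        simp [hne]
    rw [hinter, hm, hks, hs]
    rcases (flow_cols.map PySem.Str.lower).any (fun c => PySem.Str.isIn "mcm/d" c) with _ | _ <;>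
      rcases (flow_cols.map PySem.Str.lower).any (fun c => PySem.Str.isIn "kscmh" c) with _ | _ <;>
      rcases (flow_cols.map PySem.Str.lower).any (fun c =>
          (PySem.Str.isIn "scmh" c && !PySem.Str.isIn "kscmh" c)
          || (loc && PySem.Str.isIn "flow" c && !PySem.Str.isIn "kscmh" c)) with _ | _ <;>
      simp
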